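-- pv_equiv track=rewrite | github.com/MrBrantCode/unitest_baseline | mut_generate/mist_train_cf/cf_90617/solution.py | reverse_and_get_prime_numbers
-- ===== SOURCE A (Python) =====
-- import math
--
-- def reverse_and_get_prime_numbers(numbers):
--     left = 0
--     right = len(numbers) - 1
--
--     while left < right:
--         numbers[left], numbers[right] = numbers[right], numbers[left]
--         left += 1
--         right -= 1
--
--     prime_numbers = [num for num in numbers if num > 1 and all(num % i for i in range(2, int(math.sqrt(num)) + 1))]
--
--     return prime_numbers
-- ===== SOURCE B (Python) =====
-- import math
--
-- def reverse_and_get_prime_numbers(numbers):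
--     numbers.reverse()
--
--     # largest value (at least 1), then the trial-division bound
--     limit = 1
--     for x in numbers:
--         if x > limit:
--             limit = x
--     limit = math.isqrt(limit)
--
--     # base = every prime up to limit, built incrementally: a candidate is kept
--     # iff no smaller base prime <= sqrt(candidate) divides it
--     base = []
--     for c in range(2, limit + 1):
--         if _has_no_small_prime_factor(c, base):
--             base.append(c)
--
--     return [n for n in numbers if n > 1 and _has_no_small_prime_factor(n, base)]
--
-- def _has_no_small_prime_factor(n, primes):
--     for p in primes:
--         if p * p > n:
--             return True
--         if n % p == 0:
--             return False
--     return True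
-- ===== Notes on version B (the rewrite author's own statement) =====
-- stated objective: faster
-- what changed: Instead of A's per-element trial division by every integer 2..sqrt(num), B first builds (incrementally) the list of all primes up to isqrt(max of the list) once and tests each element by dividing only by those primes with p*p <= n; reversal is list.reverse() (same in-place mutation).
import Mathlib
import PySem

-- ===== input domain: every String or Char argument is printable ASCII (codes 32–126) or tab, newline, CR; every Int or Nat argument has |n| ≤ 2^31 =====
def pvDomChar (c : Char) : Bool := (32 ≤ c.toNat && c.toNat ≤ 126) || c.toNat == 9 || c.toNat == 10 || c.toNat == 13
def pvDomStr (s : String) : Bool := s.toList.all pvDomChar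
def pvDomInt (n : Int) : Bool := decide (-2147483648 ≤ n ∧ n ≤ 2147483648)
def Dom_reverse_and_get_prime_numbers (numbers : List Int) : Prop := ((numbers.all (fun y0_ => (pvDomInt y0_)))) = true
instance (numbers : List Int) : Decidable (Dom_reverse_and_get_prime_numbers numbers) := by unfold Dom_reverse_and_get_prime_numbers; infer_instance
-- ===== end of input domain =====

-- B replaces A's per-element trial division by EVERY integer up to sqrt(num) with a
-- precomputed list of the primes up to isqrt(max value), built once incrementally, and
-- tests each element against those primes only; reversal is list.reverse() (the same
-- in-place mutation of the argument; the equivalence proved is about the return value).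

-- ===== PORT A =====
-- the while loop: indices are always in range when the swap executes (0 ≤ left < right < len),
-- so the total forms pyGetD/pySetD are exact here
def pvSwapLoop (numbers : List Int) (left right : Int) : List Int :=
  if h : left < right then
    let a := PySem.List.pyGetD numbers left 0
    let b := PySem.List.pyGetD numbers right 0
    pvSwapLoop (PySem.List.pySetD (PySem.List.pySetD numbers left b) right a) (left + 1) (right - 1)
  else numbers
termination_by (right - left).toNat
decreasing_by omega

-- int(math.sqrt(num)) is evaluated only for num ≥ 2 (short-circuit) and is exact there on
-- Dom (|num| ≤ 2^31 < 2^52), so it is ported as Nat.sqrt num.toNat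
def reverse_and_get_prime_numbers (numbers : List Int) : List Int :=
  let ns := pvSwapLoop numbers 0 ((numbers.length : Int) - 1)
  ns.filter (fun num =>
    decide (num > 1) &&
      (PySem.List.pyRange 2 ((Nat.sqrt num.toNat : Int) + 1) 1).all
        (fun i => PySem.Int.mod num i != 0))

-- ===== PORT B =====
-- _has_no_small_prime_factor(n, primes): early exit when p*p > n
def pvTrial (n : Int) (primes : List Int) : Bool :=
  match primes with
  | [] => true
  | p :: ps =>
      if p * p > n then true
      else if PySem.Int.mod n p = 0 then false
      else pvTrial n ps

-- the 'limit' accumulation loop (starts at 1)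
def pvMax1 (numbers : List Int) : Int :=
  numbers.foldl (fun limit x => if x > limit then x else limit) 1

-- the base-building loop: for c in range(2, limit+1): append c if it survives
def pvBase (limit : Int) : List Int :=
  (PySem.List.pyRange 2 (limit + 1) 1).foldl
    (fun base c => if pvTrial c base then base ++ [c] else base) []

-- math.isqrt on a nonnegative int is Nat.sqrt (exact)
def reverse_and_get_prime_numbers_alt (numbers : List Int) : List Int :=
  let rev := numbers.reverse
  let limit : Int := (Nat.sqrt (pvMax1 rev).toNat : Nat)
  let base := pvBase limit
  rev.filter (fun n => decide (n > 1) && pvTrial n base)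

-- ===== PRECONDITION & SPEC =====
def Spec_reverse_and_get_prime_numbers (numbers : List Int) (out : List Int) : Prop := out = reverse_and_get_prime_numbers_alt numbers
instance (numbers : List Int) (out : List Int) : Decidable (Spec_reverse_and_get_prime_numbers numbers out) := by unfold Spec_reverse_and_get_prime_numbers; infer_instance

-- ===== CLAIM (what is proved, stated in full; the proofs are below) =====
def Claim_equal_reverse_and_get_prime_numbers : Prop := ∀ (numbers : List Int), Dom_reverse_and_get_prime_numbers numbers → Spec_reverse_and_get_prime_numbers numbers (reverse_and_get_prime_numbers numbers)

-- ===== LEMMAS AND PROOFS =====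

theorem pv_getD_append_length (pre l : List Int) (x d : Int) :
    (pre ++ x :: l).getD pre.length d = x := by
  induction pre with
  | nil => rfl
  | cons p ps ih => simpa using ih

theorem pv_set_append_length (pre l : List Int) (v : Int) :
    (pre ++ l).set pre.length v = pre ++ l.set 0 v := by
  induction pre with
  | nil => rfl
  | cons p ps ih => simp [ih]

-- the two-pointer swap loop reverses the middle segment
theorem pvSwapLoop_eq (mid pre suf : List Int) (h : pre.length = suf.length) :
    pvSwapLoop (pre ++ mid ++ suf) (pre.length : Int) ((pre.length : Int) + mid.length - 1)
      = pre ++ mid.reverse ++ suf := by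
  rcases mid with _ | ⟨a, rest⟩
  · rw [pvSwapLoop]; simp
  · rcases List.eq_nil_or_concat rest with rfl | ⟨ms, b, rfl⟩
    · rw [pvSwapLoop]; simp
    · simp only [List.concat_eq_append]
      rw [pvSwapLoop]
      rw [dif_pos (by simp; omega)]
      have hget1 : PySem.List.pyGetD (pre ++ (a :: (ms ++ [b])) ++ suf) (pre.length : Int) 0 = a := by
        rw [PySem.List.pyGetD_natCast]
        simpa using pv_getD_append_length pre (ms ++ [b] ++ suf) a 0
      have e2 : (pre.length : Int) + ((a :: (ms ++ [b])).length : Int) - 1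
          = ((pre ++ a :: ms).length : Nat) := by simp; omega
      have hget2 : PySem.List.pyGetD (pre ++ (a :: (ms ++ [b])) ++ suf)
          ((pre.length : Int) + ((a :: (ms ++ [b])).length : Int) - 1) 0 = b := by
        rw [e2, PySem.List.pyGetD_natCast]
        have : pre ++ (a :: (ms ++ [b])) ++ suf = (pre ++ a :: ms) ++ b :: suf := by simp
        rw [this]
        exact pv_getD_append_length (pre ++ a :: ms) suf b 0
      simp only [hget1, hget2]
      have hset1 : PySem.List.pySetD (pre ++ (a :: (ms ++ [b])) ++ suf) (pre.length : Int) b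
          = (pre ++ b :: ms) ++ b :: suf := by
        rw [PySem.List.pySetD_natCast]
        have : pre ++ (a :: (ms ++ [b])) ++ suf = pre ++ a :: (ms ++ b :: suf) := by simp
        rw [this, pv_set_append_length]
        simp
      simp only [hset1]
      have hset2 : PySem.List.pySetD ((pre ++ b :: ms) ++ b :: suf)
          ((pre.length : Int) + ((a :: (ms ++ [b])).length : Int) - 1) a
          = (pre ++ [b]) ++ ms ++ (a :: suf) := by
        rw [e2, PySem.List.pySetD_natCast]
        have hlen : (pre ++ a :: ms).length = (pre ++ b :: ms).length := by simp
        have hlist : pre ++ b :: ms ++ b :: suf = (pre ++ b :: ms) ++ b :: suf := by simp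
        rw [hlist, hlen, pv_set_append_length]
        simp
      simp only [hset2]
      have key := pvSwapLoop_eq ms (pre ++ [b]) (a :: suf) (by simp [h])
      have eL : (pre.length : Int) + 1 = (((pre ++ [b]).length : Nat) : Int) := by simp
      have eR : (pre.length : Int) + ((a :: (ms ++ [b])).length : Int) - 1 - 1
          = (((pre ++ [b]).length : Nat) : Int) + (ms.length : Int) - 1 := by
        simp only [List.length_append, List.length_cons, List.length_nil]
        push_cast
        ring
      rw [eL, eR, key]
      simp
termination_by mid.length
decreasing_by simp_all

theorem pvSwapLoop_reverse (xs : List Int) :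
    pvSwapLoop xs 0 ((xs.length : Int) - 1) = xs.reverse := by
  have h := pvSwapLoop_eq xs [] [] rfl
  simp at h
  simpa using h

-- proof-side closed form for the base list: the primes up to k, ascending
def pvPrimesUpTo (k : Nat) : List Int :=
  ((List.range (k + 1)).filter (fun c => decide (Nat.Prime c))).map (fun c => Int.ofNat c)

theorem pv_mem_primesUpTo (k : Nat) (p : Int) :
    p ∈ pvPrimesUpTo k ↔ ∃ c : Nat, c.Prime ∧ c ≤ k ∧ p = (c : Int) := by
  unfold pvPrimesUpTo
  simp only [List.mem_map, List.mem_filter, List.mem_range, decide_eq_true_eq]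
  constructor
  · rintro ⟨c, ⟨hck, hc⟩, rfl⟩; exact ⟨c, hc, by omega, rfl⟩
  · rintro ⟨c, hc, hck, rfl⟩; exact ⟨c, ⟨by omega, hc⟩, rfl⟩

theorem pv_primesUpTo_two_le (k : Nat) : ∀ p ∈ pvPrimesUpTo k, 2 ≤ p := by
  intro p hp
  obtain ⟨c, hc, _, rfl⟩ := (pv_mem_primesUpTo k p).mp hp
  exact_mod_cast hc.two_le

theorem pv_primesUpTo_sorted (k : Nat) : (pvPrimesUpTo k).Pairwise (· < ·) := by
  unfold pvPrimesUpTo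
  refine List.Pairwise.map _ (fun a b h => ?_) (List.Pairwise.sublist List.filter_sublist List.pairwise_lt_range)
  exact Int.ofNat_lt.mpr h

-- early-exit characterisation of the trial loop on a sorted list of numbers ≥ 2
theorem pvTrial_iff (n : Int) (L : List Int) (h2 : ∀ p ∈ L, 2 ≤ p)
    (hs : L.Pairwise (· < ·)) :
    (pvTrial n L = true ↔ ∀ p ∈ L, p * p ≤ n → ¬ p ∣ n) := by
  induction L with
  | nil => simp [pvTrial]
  | cons p ps ih =>
    have hp2 : 2 ≤ p := h2 p (by simp)
    have hlt : ∀ q ∈ ps, p < q := (List.pairwise_cons.mp hs).1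
    have ih' := ih (fun q hq => h2 q (by simp [hq])) (List.pairwise_cons.mp hs).2
    simp only [pvTrial]
    split_ifs with hgt hmod
    · simp only [true_iff]
      · intro q hq hqq
        rcases List.mem_cons.mp hq with rfl | hq'
        · omega
        · exfalso
          have h1 := hlt q hq'
          have h2q := h2 q (by simp [hq'])
          nlinarith
    · have hd : p ∣ n := (PySem.Int.mod_eq_zero_iff_dvd n p).mp hmod
      simp only [false_iff, not_forall]
      exact ⟨p, by simp, by omega, fun h => h hd⟩
    · rw [ih']
      constructor
      · intro H q hq hqq
        rcases List.mem_cons.mp hq with rfl | hq'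
        · intro hdv; exact hmod ((PySem.Int.mod_eq_zero_iff_dvd n q).mpr hdv)
        · exact H q hq' hqq
      · intro H q hq hqq; exact H q (by simp [hq]) hqq

-- checking only primes up to a bound ≥ sqrt n decides primality
theorem pv_prime_test (n k : Nat) (hn : 2 ≤ n) (hk : Nat.sqrt n ≤ k) :
    ((∀ c : Nat, c.Prime → c ≤ k → c * c ≤ n → ¬ c ∣ n) ↔ n.Prime) := by
  constructor
  · intro H
    by_contra hnp
    have hq : (Nat.minFac n).Prime := Nat.minFac_prime (by omega)
    have hsq : Nat.minFac n ^ 2 ≤ n := Nat.minFac_sq_le_self (by omega) hnp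
    have h1 : Nat.minFac n * Nat.minFac n ≤ n := by nlinarith
    have hle : Nat.minFac n ≤ Nat.sqrt n := Nat.le_sqrt.mpr h1
    exact H _ hq (le_trans hle hk) h1 (Nat.minFac_dvd n)
  · intro hp c hc hck hcc hdvd
    have hcn : c = n := (Nat.prime_dvd_prime_iff_eq hc hp).mp hdvd
    subst hcn
    have := hc.two_le
    nlinarith

theorem pv_trial_primes (n k : Nat) (hn : 2 ≤ n) (hk : Nat.sqrt n ≤ k) :
    (pvTrial (n : Int) (pvPrimesUpTo k) = true ↔ n.Prime) := by
  rw [pvTrial_iff _ _ (pv_primesUpTo_two_le k) (pv_primesUpTo_sorted k),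
    ← pv_prime_test n k hn hk]
  constructor
  · intro H c hc hck hcc hdvd
    exact H (c : Int) ((pv_mem_primesUpTo k _).mpr ⟨c, hc, hck, rfl⟩)
      (by exact_mod_cast hcc) (by exact_mod_cast hdvd)
  · intro H p hp hpp hdvd
    obtain ⟨c, hc, hck, rfl⟩ := (pv_mem_primesUpTo k p).mp hp
    exact H c hc hck (by exact_mod_cast hpp) (by exact_mod_cast hdvd)

-- the base-building loop produces exactly the primes up to its bound
theorem pvBase_eq (k : Nat) : pvBase (k : Int) = pvPrimesUpTo k := by
  induction k with
  | zero => decide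
  | succ k ih =>
    by_cases h1 : k = 0
    · subst h1; decide
    · have hstep : pvPrimesUpTo (k + 1)
          = pvPrimesUpTo k ++ if Nat.Prime (k + 1) then [((k + 1 : Nat) : Int)] else [] := by
        unfold pvPrimesUpTo
        rw [List.range_succ, List.filter_append, List.map_append]
        by_cases hp : Nat.Prime (k + 1) <;> simp [hp]
      have htr : (pvTrial ((k : Int) + 1) (pvPrimesUpTo k) = true) ↔ Nat.Prime (k + 1) := by
        have hb : Nat.sqrt (k + 1) ≤ k := by
          have := Nat.sqrt_lt_self (n := k + 1) (by omega)
          omega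
        have := pv_trial_primes (k + 1) k (by omega) hb
        rwa [show (((k + 1 : Nat) : Int)) = (k : Int) + 1 by omega] at this
      unfold pvBase at ih ⊢
      have hr : PySem.List.pyRange 2 (((k + 1 : Nat) : Int) + 1) 1
          = PySem.List.pyRange 2 ((k : Int) + 1) 1 ++ [(k : Int) + 1] := by
        have h2 : (2 : Int) ≤ (k : Int) + 1 := by omega
        have := PySem.List.pyRange_one_succ_right (a := 2) (b := (k : Int) + 1) h2
        rw [show (((k + 1 : Nat) : Int) + 1) = ((k : Int) + 1) + 1 by omega, this]
      rw [hr, List.foldl_append, ih, List.foldl_cons, List.foldl_nil, hstep]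
      by_cases hp : Nat.Prime (k + 1)
      · rw [if_pos (htr.mpr hp), if_pos hp]
        norm_num
      · rw [if_neg (fun h => hp (htr.mp h)), if_neg hp]
        simp

-- the limit loop bounds every element and is at least 1
theorem pvMax1_spec (xs : List Int) : 1 ≤ pvMax1 xs ∧ ∀ x ∈ xs, x ≤ pvMax1 xs := by
  have hfun : (fun (m x : Int) => if x > m then x else m) = fun m x => max m x := by
    funext m x
    by_cases h : x > m <;> simp [max_def] <;> omega
  unfold pvMax1
  rw [hfun]
  exact ⟨(PySem.List.le_foldl_max xs 1).1, (PySem.List.le_foldl_max xs 1).2⟩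

-- A's inline sqrt-bounded all(...) decides primality (for num > 1)
theorem pvPredA_iff (n : Int) (hn : 1 < n) :
    (((PySem.List.pyRange 2 ((Nat.sqrt n.toNat : Int) + 1) 1).all
      (fun i => PySem.Int.mod n i != 0)) = true ↔ Nat.Prime n.toNat) := by
  have hcast : n = ((n.toNat : Nat) : Int) := by omega
  rw [Nat.prime_def_le_sqrt]
  simp only [List.all_eq_true, PySem.List.mem_pyRange_one, bne_iff_ne, ne_eq, and_imp]
  constructor
  · intro H
    refine ⟨by omega, ?_⟩
    intro m h2m hms hdvd
    refine H (m : Int) (by exact_mod_cast h2m) (by omega) ?_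
    rw [PySem.Int.mod_eq_zero_iff_dvd, hcast]
    exact_mod_cast hdvd
  · rintro ⟨-, H⟩ i h2i hisq hmod
    have hdvd : i ∣ n := (PySem.Int.mod_eq_zero_iff_dvd n i).mp hmod
    have hi : i = ((i.toNat : Nat) : Int) := by omega
    refine H i.toNat (by omega) (by omega) ?_
    rw [hcast, hi] at hdvd
    exact_mod_cast hdvd

-- ===== VERDICT (by name: the statement is the Claim_ definition above) =====
theorem reverse_and_get_prime_numbers_spec : Claim_equal_reverse_and_get_prime_numbers := by
  intro numbers _
  unfold Spec_reverse_and_get_prime_numbers reverse_and_get_prime_numbers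
    reverse_and_get_prime_numbers_alt
  rw [pvSwapLoop_reverse]
  simp only []
  apply List.filter_congr
  intro n hn
  by_cases hgt : 1 < n
  · obtain ⟨h1, h2⟩ := pvMax1_spec numbers.reverse
    have hle : n ≤ pvMax1 numbers.reverse := h2 n hn
    have hM : n.toNat ≤ (pvMax1 numbers.reverse).toNat := by omega
    have hk : Nat.sqrt n.toNat ≤ Nat.sqrt (pvMax1 numbers.reverse).toNat := Nat.sqrt_le_sqrt hM
    have e2 : (pvTrial n (pvBase ((Nat.sqrt (pvMax1 numbers.reverse).toNat : Nat) : Int)) = true)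
        ↔ Nat.Prime n.toNat := by
      rw [pvBase_eq]
      have := pv_trial_primes n.toNat (Nat.sqrt (pvMax1 numbers.reverse).toNat) (by omega) hk
      rwa [show ((n.toNat : Nat) : Int) = n by omega] at this
    simp only [decide_eq_true hgt, Bool.true_and]
    rw [Bool.eq_iff_iff, pvPredA_iff n hgt, e2]
  · simp [hgt]
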